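-- pv_equiv track=rewrite | github.com/jiekaitao/SeniorProject | TRM_Spinner/worker/test_hanoi_generalize.py | _pegs_to_grid
-- ===== SOURCE A (Python) =====
-- def _pegs_to_grid(pegs, height):
--     grid = []
--     for row in range(height):
--         r = []
--         for peg in pegs:
--             r.append(peg[row] if row < len(peg) else 0)
--         grid.append(r)
--     return list(reversed(grid))
-- ===== SOURCE B (Python) =====
-- def _pegs_to_grid(pegs, height):
--     # Scatter approach: preallocate an all-zero grid, then write each disc
--     # directly into its final (already-reversed) position; no transpose, no
--     # padding pass, no final reversal.
--     grid = [[0] * len(pegs) for _ in range(height)]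
--     h = len(grid)
--     for j, peg in enumerate(pegs):
--         for i in range(min(len(peg), h)):
--             grid[h - 1 - i][j] = peg[i]
--     return grid
-- ===== Notes on version B (the rewrite author's own statement) =====
-- stated objective: alternative
-- what changed: B preallocates an all-zero height x len(pegs) grid and scatter-writes each disc directly into its final reversed position grid[h-1-i][j] (O(discs) writes), instead of A's gather: building every row cell by cell with appends and reversing the list at the end.
import Mathlib
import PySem

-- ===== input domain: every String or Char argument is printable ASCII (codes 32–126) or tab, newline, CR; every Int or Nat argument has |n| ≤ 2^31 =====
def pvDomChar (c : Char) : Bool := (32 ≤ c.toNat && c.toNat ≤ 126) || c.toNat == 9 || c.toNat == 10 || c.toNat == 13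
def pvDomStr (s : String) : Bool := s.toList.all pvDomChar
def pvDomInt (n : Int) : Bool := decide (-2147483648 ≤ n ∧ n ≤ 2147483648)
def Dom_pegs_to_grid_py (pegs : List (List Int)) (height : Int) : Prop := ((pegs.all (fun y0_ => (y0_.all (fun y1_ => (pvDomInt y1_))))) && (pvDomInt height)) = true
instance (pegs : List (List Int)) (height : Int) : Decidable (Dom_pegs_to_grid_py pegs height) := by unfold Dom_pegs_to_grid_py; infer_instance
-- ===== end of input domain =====

-- B scatter-writes each disc into a preallocated zero grid at its final reversed position,
-- instead of A's gather (build rows cell by cell, then reverse); 'alternative', not faster.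

-- ===== PORT A =====
-- literal transliteration of A: row-major double loop appending cells, then reversed
def pegs_to_grid_py (pegs : List (List Int)) (height : Int) : List (List Int) :=
  let grid := (PySem.List.pyRange 0 height 1).foldl
    (fun grid row =>
      grid ++ [pegs.foldl
        (fun r peg => r ++ [if row < (peg.length : Int) then PySem.List.pyGetD peg row 0 else 0]) []])
    []
  grid.reverse

-- ===== PORT B =====
-- transliteration of Source B: preallocated zero grid, then nested scatter writes
-- grid[h-1-i][j] = peg[i]; list mutation is modelled by List.modify / List.set.
def pegs_to_grid_py_alt (pegs : List (List Int)) (height : Int) : List (List Int) :=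
  let grid0 := (PySem.List.pyRange 0 height 1).map (fun _ => List.replicate pegs.length (0 : Int))
  let h := grid0.length
  (pegs.zipIdx).foldl
    (fun grid pj =>
      (List.range (min pj.1.length h)).foldl
        (fun grid i => grid.modify (h - 1 - i) (fun row => row.set pj.2 (pj.1.getD i 0)))
        grid)
    grid0

-- ===== PRECONDITION & SPEC =====
def Spec_pegs_to_grid_py (pegs : List (List Int)) (height : Int) (out : List (List Int)) : Prop := out = pegs_to_grid_py_alt pegs height
instance (pegs : List (List Int)) (height : Int) (out : List (List Int)) : Decidable (Spec_pegs_to_grid_py pegs height out) := by unfold Spec_pegs_to_grid_py; infer_instance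

-- ===== CLAIM (what is proved, stated in full; the proofs are below) =====
def Claim_equal_pegs_to_grid_py : Prop := ∀ (pegs : List (List Int)) (height : Int), Dom_pegs_to_grid_py pegs height → Spec_pegs_to_grid_py pegs height (pegs_to_grid_py pegs height)

-- ===== LEMMAS AND PROOFS =====

-- entry (r,c) of a grid, 0 outside
def pvEnt (g : List (List Int)) (r c : Nat) : Int := (g.getD r []).getD c 0

-- the inner scatter loop of B, as a named function
def pvInner (g : List (List Int)) (peg : List Int) (j h n : Nat) : List (List Int) :=
  (List.range n).foldl
    (fun g i => g.modify (h - 1 - i) (fun row => row.set j (peg.getD i 0))) g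

theorem pvInner_succ (g : List (List Int)) (peg : List Int) (j h n : Nat) :
    pvInner g peg j h (n+1)
      = (pvInner g peg j h n).modify (h - 1 - n) (fun row => row.set j (peg.getD n 0)) := by
  unfold pvInner
  rw [List.range_succ, List.foldl_append]
  rfl

theorem getD_modify (g : List (List Int)) (k : Nat) (f : List Int → List Int) (r : Nat) :
    (g.modify k f).getD r [] = if k = r ∧ r < g.length then f (g.getD r []) else g.getD r [] := by
  have h1 := List.getElem?_modify f k g r
  by_cases hr : r < g.length
  · by_cases hk : k = r
    · subst hk
      simp only [List.getD, hr, List.getElem?_eq_getElem] at h1 ⊢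
      simp [hr]
    · simp only [List.getD, hr, List.getElem?_eq_getElem] at h1 ⊢
      simp [hk, hr]
  · rw [if_neg (by tauto), List.getD_eq_default _ _ (by simpa using Nat.le_of_not_lt hr),
      List.getD_eq_default _ _ (Nat.le_of_not_lt hr)]

theorem pvEnt_modify_set (g : List (List Int)) (k j : Nat) (v : Int) (r c : Nat)
    (hj : j < (g.getD k []).length) :
    pvEnt (g.modify k (fun row => row.set j v)) r c
      = if k = r ∧ r < g.length ∧ j = c then v else pvEnt g r c := by
  unfold pvEnt
  rw [getD_modify]
  by_cases hkr : k = r ∧ r < g.length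
  · obtain ⟨hk, hr⟩ := hkr
    subst hk
    rw [if_pos ⟨rfl, hr⟩]
    by_cases hjc : j = c
    · subst hjc
      rw [if_pos ⟨rfl, hr, rfl⟩]
      simp only [List.getD] at hj
      simp [hj]
    · rw [if_neg (by tauto)]
      simp [List.getD, List.getElem?_set_ne (by omega : j ≠ c)]
  · rw [if_neg hkr, if_neg (by tauto)]

theorem pvInner_length (g : List (List Int)) (peg : List Int) (j h n : Nat) :
    (pvInner g peg j h n).length = g.length := by
  induction n with
  | zero => rfl
  | succ m ih => rw [pvInner_succ]; simpa using ih

theorem pvInner_rowlen (g : List (List Int)) (peg : List Int) (j h n : Nat) (r : Nat) :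
    ((pvInner g peg j h n).getD r []).length = (g.getD r []).length := by
  induction n with
  | zero => rfl
  | succ m ih =>
    rw [pvInner_succ, getD_modify]
    split_ifs with hc
    · simpa using ih
    · exact ih

-- effect of the inner loop on entries (j < every row's width, n ≤ h)
theorem pvInner_ent (g : List (List Int)) (peg : List Int) (j h n : Nat)
    (hlen : g.length = h) (hn : n ≤ h)
    (hw : ∀ r, r < h → j < (g.getD r []).length) (r c : Nat) (hr : r < h) :
    pvEnt (pvInner g peg j h n) r c
      = if j = c ∧ h ≤ n + r then peg.getD (h - 1 - r) 0 else pvEnt g r c := by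
  induction n with
  | zero =>
    simp only [pvInner, List.range_zero, List.foldl_nil]
    rw [if_neg (by omega)]
  | succ m ih =>
    rw [pvInner_succ]
    have hk : h - 1 - m < h := by omega
    rw [pvEnt_modify_set _ _ _ _ _ _
      (by rw [pvInner_rowlen]; exact hw _ hk)]
    rw [pvInner_length, hlen]
    rw [ih (by omega)]
    by_cases h1 : h - 1 - m = r
    · have : h - 1 - r = m := by omega
      by_cases hjc : j = c
      · subst hjc
        rw [if_pos ⟨h1, hr, rfl⟩, if_pos ⟨rfl, by omega⟩, this]
      · rw [if_neg (by tauto), if_neg (by tauto), if_neg (by tauto)]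
    · rw [if_neg (by tauto)]
      by_cases h2 : j = c ∧ h ≤ m + r
      · rw [if_pos h2, if_pos ⟨h2.1, by omega⟩]
      · rw [if_neg h2, if_neg (by
          rintro ⟨hjc, hhr⟩
          exact h2 ⟨hjc, by omega⟩)]

-- the outer fold of B over pegs.zipIdx, entry-wise
theorem pvOuter_length (ps : List (List Int)) (j0 : Nat) (g : List (List Int)) (h : Nat) :
    ((ps.zipIdx j0).foldl (fun grid pj => pvInner grid pj.1 pj.2 h (min pj.1.length h)) g).length
      = g.length := by
  induction ps generalizing j0 g with
  | nil => rfl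
  | cons p rest ih =>
    rw [List.zipIdx_cons, List.foldl_cons, ih]
    exact pvInner_length _ _ _ _ _

theorem pvOuter_rowlen (ps : List (List Int)) (j0 : Nat) (g : List (List Int)) (h r : Nat) :
    (((ps.zipIdx j0).foldl (fun grid pj => pvInner grid pj.1 pj.2 h (min pj.1.length h)) g).getD r []).length
      = (g.getD r []).length := by
  induction ps generalizing j0 g with
  | nil => rfl
  | cons p rest ih =>
    rw [List.zipIdx_cons, List.foldl_cons, ih]
    exact pvInner_rowlen _ _ _ _ _ _

theorem pvOuter_ent (ps : List (List Int)) (j0 : Nat) (g : List (List Int)) (h w : Nat)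
    (hlen : g.length = h) (hw : ∀ r, r < h → (g.getD r []).length = w)
    (hj0 : j0 + ps.length ≤ w) (r c : Nat) (hr : r < h) (hc : c < w) :
    pvEnt ((ps.zipIdx j0).foldl (fun grid pj => pvInner grid pj.1 pj.2 h (min pj.1.length h)) g) r c
      = if j0 ≤ c ∧ c < j0 + ps.length ∧ h ≤ min ((ps.getD (c - j0) []).length) h + r
        then (ps.getD (c - j0) []).getD (h - 1 - r) 0 else pvEnt g r c := by
  induction ps generalizing j0 g with
  | nil =>
    simp only [List.zipIdx_nil, List.foldl_nil]
    rw [if_neg (by rintro ⟨h1, h2, -⟩; simp at h2; omega)]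
  | cons p rest ih =>
    rw [List.zipIdx_cons, List.foldl_cons]
    have hg' : (pvInner g p j0 h (min p.length h)).length = h := by
      rw [pvInner_length, hlen]
    have hw' : ∀ r', r' < h → ((pvInner g p j0 h (min p.length h)).getD r' []).length = w := by
      intro r' hr'
      rw [pvInner_rowlen]; exact hw _ hr'
    rw [ih (j0 + 1) _ hg' hw' (by simp only [List.length_cons] at hj0; omega)]
    simp only [List.length_cons] at hj0
    rw [pvInner_ent g p j0 h (min p.length h) hlen (by omega)
      (fun r' hr' => by rw [hw _ hr']; omega) r c hr]
    by_cases h1 : j0 + 1 ≤ c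
    · have hsub : c - j0 = (c - (j0 + 1)) + 1 := by omega
      rw [hsub]
      simp only [List.getD_cons_succ, List.length_cons]
      split_ifs <;> first | rfl | omega
    · by_cases h3 : j0 = c
      · subst h3
        simp only [Nat.sub_self, List.getD_cons_zero, List.length_cons, true_and]
        split_ifs <;> first | rfl | omega
      · simp only [List.length_cons]
        split_ifs <;> first | rfl | omega

-- A's double foldl is a map of maps, reversed
theorem pegs_to_grid_py_eq_map (pegs : List (List Int)) (height : Int) :
    pegs_to_grid_py pegs height =
      ((PySem.List.pyRange 0 height 1).map (fun row =>
        pegs.map (fun peg =>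
          if row < (peg.length : Int) then PySem.List.pyGetD peg row 0 else 0))).reverse := by
  unfold pegs_to_grid_py
  rw [PySem.List.foldl_append_singleton_eq_map
      (f := fun row => pegs.foldl
        (fun r peg => r ++ [if row < (peg.length : Int) then PySem.List.pyGetD peg row 0 else 0]) [])]
  simp only [List.nil_append]
  congr 1
  refine List.map_congr_left ?_
  intro row _
  rw [PySem.List.foldl_append_singleton_eq_map]
  simp

-- entries of the initial zero grid
theorem pvEnt_grid0 (w h r c : Nat) :
    pvEnt ((List.range h).map (fun _ => List.replicate w (0 : Int))) r c = 0 := by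
  unfold pvEnt
  simp only [List.getD, List.getElem?_map]
  by_cases hr : r < h <;> by_cases hc : c < w <;> simp [hr, hc]

-- the heart of the equivalence: gather-then-reverse equals scatter into a zero grid
theorem pv_main (pegs : List (List Int)) (h : Nat) :
    ((List.range h).map (fun (row : Nat) =>
        pegs.map (fun peg =>
          if ((row : Nat) : Int) < (peg.length : Int) then PySem.List.pyGetD peg ((row : Nat) : Int) 0 else 0))).reverse
      = pegs.zipIdx.foldl (fun grid pj => pvInner grid pj.1 pj.2 h (min pj.1.length h))
          ((List.range h).map (fun _ => List.replicate pegs.length (0 : Int))) := by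
  have hg0len : ((List.range h).map (fun _ => List.replicate pegs.length (0 : Int))).length = h := by
    simp
  have hg0row : ∀ r, r < h →
      (((List.range h).map (fun _ => List.replicate pegs.length (0 : Int))).getD r []).length
        = pegs.length := by
    intro r hr
    rw [List.getD_eq_getElem _ _ (by simpa using hr)]
    simp
  have hBlen := pvOuter_length pegs 0
    ((List.range h).map (fun _ => List.replicate pegs.length (0 : Int))) h
  apply List.ext_getElem
  · simp only [List.length_reverse, List.length_map, List.length_range, hBlen, hg0len]
  · intro r h1 h2
    have hr : r < h := by simpa using h1
    have hrowB : ((pegs.zipIdx.foldl (fun grid pj => pvInner grid pj.1 pj.2 h (min pj.1.length h))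
        ((List.range h).map (fun _ => List.replicate pegs.length (0 : Int))))[r]).length
        = pegs.length := by
      have h3 := pvOuter_rowlen pegs 0
        ((List.range h).map (fun _ => List.replicate pegs.length (0 : Int))) h r
      rw [List.getD_eq_getElem _ _ h2,
        List.getD_eq_getElem _ _ (by rw [hg0len]; exact hr)] at h3
      rw [h3]
      simp
    apply List.ext_getElem
    · rw [hrowB, List.getElem_reverse]
      simp
    · intro c hc1 hc2
      have hcw : c < pegs.length := by rwa [hrowB] at hc2
      have hB := pvOuter_ent pegs 0
        ((List.range h).map (fun _ => List.replicate pegs.length (0 : Int))) h pegs.length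
        hg0len hg0row (by omega) r c hr hcw
      rw [pvEnt_grid0] at hB
      unfold pvEnt at hB
      rw [← List.getD_eq_getElem _ (0 : Int) hc2, ← List.getD_eq_getElem _ ([] : List Int) h2, hB]
      simp only [Nat.zero_add, Nat.sub_zero, Nat.zero_le, true_and]
      simp only [List.getElem_reverse, List.getElem_map, List.getElem_range,
        List.length_map, List.length_range]
      rw [List.getD_eq_getElem pegs _ hcw]
      by_cases hcond : ((h - 1 - r : Nat) : Int) < (pegs[c].length : Int)
      · rw [if_pos hcond, if_pos ⟨hcw, by
          have hc' : h - 1 - r < pegs[c].length := by exact_mod_cast hcond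
          omega⟩, PySem.List.pyGetD_natCast]
      · rw [if_neg hcond, if_neg (by
          rintro ⟨-, hcnd⟩
          exact hcond (by exact_mod_cast (show h - 1 - r < pegs[c].length by omega)))]

theorem pegs_to_grid_py_spec : Claim_equal_pegs_to_grid_py := by
  intro pegs height _
  unfold Spec_pegs_to_grid_py pegs_to_grid_py_alt
  rw [pegs_to_grid_py_eq_map]
  have hpr : PySem.List.pyRange 0 height 1 = (List.range height.toNat).map (fun (k : Nat) => (k : Int)) := by
    by_cases hpos : 0 ≤ height
    · obtain ⟨n, rfl⟩ := Int.eq_ofNat_of_zero_le hpos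
      rw [Int.toNat_natCast]
      exact PySem.List.pyRange_zero_natCast n
    · have h0 : (PySem.List.pyRange 0 height 1).length = 0 := by
        rw [PySem.List.length_pyRange_one]; omega
      have h1 : height.toNat = 0 := by omega
      rw [List.length_eq_zero_iff.mp h0, h1, List.range_zero, List.map_nil]
  rw [hpr]
  simp only [List.map_map, Function.comp_def, List.length_map, List.length_range]
  exact pv_main pegs height.toNat
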